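-- pv_equiv track=rewrite | github.com/boost-devs/coding-test-study | coodingpenguin/two_pointer/20442_ㅋㅋ루ㅋㅋ.py | count_number_of_k
-- ===== SOURCE A (Python) =====
-- def count_number_of_k(word):
--     left_k, right_k = [], []
--     count = 0  # 왼쪽 K의 개수
--     for i in range(len(word)):
--         if word[i] == "K":
--             count += 1
--         else:
--             left_k.append(count)
--     count = 0  # 오른쪽 K의 개수
--     for i in range(len(word) - 1, -1, -1):
--         if word[i] == "K":
--             count += 1
--         else:
--             right_k.append(count)
--     right_k.reverse()
--     return left_k, right_k
-- ===== SOURCE B (Python) =====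
-- def count_number_of_k(word):
--     total = sum(1 for ch in word if ch == 'K')
--     left_k, right_k = [], []
--     seen = 0
--     for ch in word:
--         if ch == 'K':
--             seen += 1
--         else:
--             left_k.append(seen)
--             right_k.append(total - seen)
--     return left_k, right_k
-- ===== Notes on version B (the rewrite author's own statement) =====
-- stated objective: simpler
-- what changed: Single forward pass: pre-count the total number of K's, keep a running count of K's seen, and emit right-side counts as total minus seen, eliminating A's backward second pass and the list reverse.
import Mathlib
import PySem

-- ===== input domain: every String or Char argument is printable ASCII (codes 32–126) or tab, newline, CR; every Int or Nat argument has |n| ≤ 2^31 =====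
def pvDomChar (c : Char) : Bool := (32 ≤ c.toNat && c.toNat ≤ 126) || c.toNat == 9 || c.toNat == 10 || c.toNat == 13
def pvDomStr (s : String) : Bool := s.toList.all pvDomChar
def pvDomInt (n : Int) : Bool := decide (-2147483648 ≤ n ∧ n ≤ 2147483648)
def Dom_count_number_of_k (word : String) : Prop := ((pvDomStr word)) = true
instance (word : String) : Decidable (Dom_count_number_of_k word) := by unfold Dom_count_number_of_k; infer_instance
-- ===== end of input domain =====

-- B replaces A's two traversals (forward + backward with a final reverse) by one forward pass
-- using a pre-counted total of K's; objective: simpler.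


-- ===== PORT A =====
-- forward pass collecting left counts, backward pass (fold over the reversed list) collecting
-- right counts, then reverse of the second result — step for step as in A.
def count_number_of_k (word : String) : List Int × List Int :=
  let l := word.toList
  let st1 := l.foldl (fun (st : List Int × Int) ch =>
      if ch = 'K' then (st.1, st.2 + 1) else (st.1 ++ [st.2], st.2)) ([], 0)
  let st2 := l.reverse.foldl (fun (st : List Int × Int) ch =>
      if ch = 'K' then (st.1, st.2 + 1) else (st.1 ++ [st.2], st.2)) ([], 0)
  (st1.1, st2.1.reverse)

-- ===== PORT B =====
-- pre-count of K's (the sum(...) generator), then one forward fold appending seen / total - seen.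
def count_number_of_k_alt (word : String) : List Int × List Int :=
  let l := word.toList
  let total : Int := l.foldl (fun acc ch => if ch = 'K' then acc + 1 else acc) 0
  let st := l.foldl (fun (st : Int × List Int × List Int) ch =>
      if ch = 'K' then (st.1 + 1, st.2.1, st.2.2)
      else (st.1, st.2.1 ++ [st.1], st.2.2 ++ [total - st.1])) (0, [], [])
  (st.2.1, st.2.2)

-- ===== PRECONDITION & SPEC =====
def Spec_count_number_of_k (word : String) (out : List Int × List Int) : Prop := out = count_number_of_k_alt word
instance (word : String) (out : List Int × List Int) : Decidable (Spec_count_number_of_k word out) := by unfold Spec_count_number_of_k; infer_instance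

-- ===== CLAIM (what is proved, stated in full; the proofs are below) =====
def Claim_equal_count_number_of_k : Prop := ∀ (word : String), Dom_count_number_of_k word → Spec_count_number_of_k word (count_number_of_k word)

-- ===== LEMMAS AND PROOFS =====

-- number of 'K' in a char list, as Int
def cntK (l : List Char) : Int := (l.count 'K' : Int)

-- left counts produced starting from running count c
def glK : List Char → Int → List Int
  | [], _ => []
  | x :: xs, c => if x = 'K' then glK xs (c + 1) else c :: glK xs c

-- right counts in forward order (number of K's strictly after each non-K position)
def grK : List Char → List Int
  | [] => []
  | x :: xs => if x = 'K' then grK xs else cntK xs :: grK xs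

theorem cntK_nil : cntK [] = 0 := rfl

theorem cntK_cons (x : Char) (xs : List Char) :
    cntK (x :: xs) = (if x = 'K' then 1 else 0) + cntK xs := by
  by_cases h : x = 'K' <;> simp [cntK, h] <;> omega

theorem cntK_reverse (l : List Char) : cntK l.reverse = cntK l := by
  simp [cntK]

-- the A-style fold with accumulator
theorem foldlA (l : List Char) (acc : List Int) (c : Int) :
    l.foldl (fun (st : List Int × Int) ch =>
      if ch = 'K' then (st.1, st.2 + 1) else (st.1 ++ [st.2], st.2)) (acc, c)
      = (acc ++ glK l c, c + cntK l) := by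
  induction l generalizing acc c with
  | nil => simp [glK, cntK_nil]
  | cons x xs ih =>
      by_cases h : x = 'K' <;> simp [h, glK, ih, cntK_cons] <;> omega

theorem glK_append_singleton (xs : List Char) (x : Char) (c : Int) :
    glK (xs ++ [x]) c = glK xs c ++ (if x = 'K' then [] else [c + cntK xs]) := by
  induction xs generalizing c with
  | nil => by_cases h : x = 'K' <;> simp [h, glK, cntK_nil]
  | cons y ys ih =>
      by_cases hy : y = 'K' <;> by_cases hx : x = 'K' <;>
        simp [hy, hx, glK, ih, cntK_cons] <;>
        first
          | (rw [← hx, ih, hx]; simp)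
          | ring_nf

theorem glK_reverse (l : List Char) : (glK l.reverse 0).reverse = grK l := by
  induction l with
  | nil => simp [glK, grK]
  | cons x xs ih =>
      by_cases h : x = 'K' <;>
        simp [grK, h, List.reverse_cons, glK_append_singleton, cntK_reverse, ih]

theorem grK_eq_map (l : List Char) (c : Int) :
    grK l = (glK l c).map (fun v => c + cntK l - v) := by
  induction l generalizing c with
  | nil => simp [glK, grK]
  | cons x xs ih =>
      by_cases h : x = 'K' <;> simp [grK, glK, h, cntK_cons]
      · rw [ih (c + 1)]; congr 1; funext v; ring
      · exact ih c

-- the B-style fold with accumulators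
theorem foldlB (t : Int) (l : List Char) (c : Int) (L R : List Int) :
    l.foldl (fun (st : Int × List Int × List Int) ch =>
      if ch = 'K' then (st.1 + 1, st.2.1, st.2.2)
      else (st.1, st.2.1 ++ [st.1], st.2.2 ++ [t - st.1])) (c, L, R)
      = (c + cntK l, L ++ glK l c, R ++ (glK l c).map (fun v => t - v)) := by
  induction l generalizing c L R with
  | nil => simp [glK, cntK_nil]
  | cons x xs ih =>
      by_cases h : x = 'K' <;> simp [h, glK, ih, cntK_cons] <;> omega

theorem foldl_total (l : List Char) :
    l.foldl (fun acc ch => if ch = 'K' then acc + 1 else acc) (0 : Int) = cntK l := by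
  rw [PySem.List.foldl_ite_add_one]
  simp only [cntK, List.count_eq_countP, zero_add, Nat.cast_inj]
  have h : (fun x : Char => decide (x = 'K')) = (fun x : Char => x == 'K') := by
    funext x; by_cases hx : x = 'K' <;> simp [hx]
  rw [h]

-- ===== VERDICT (by name: the statement is the Claim_ definition above) =====
theorem count_number_of_k_spec : Claim_equal_count_number_of_k := by
  intro word _
  unfold Spec_count_number_of_k count_number_of_k count_number_of_k_alt
  simp only [foldlA, foldlB, foldl_total]
  refine Prod.ext (by simp) ?_
  simp only [List.nil_append]
  rw [glK_reverse, grK_eq_map (word.toList) 0]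
  simp
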